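-- pv_equiv track=rewrite | github.com/khannasejal/python_codes | HiC_analysis/Compartments/compartment_analysis_v3.py | return_tss_mappings
-- ===== SOURCE A (Python) =====
-- from collections import defaultdict
--
-- def return_tss_mappings(comp1,comp2):
--     mappings = []
--     for group1, group2 in zip(comp1,comp2):
--         group2_dict = defaultdict(list)
--         for sublist2 in group2:
--             for ele2 in sublist2:
--                 parts = ele2.split('_')
--                 key = (parts[2], parts[3], parts[4])
--                 group2_dict[key].append(ele2)
--         group_result =[]
--         for sublist1 in group1:
--             sublist_result = []
--             for ele1 in sublist1:
--                 parts = ele1.split('_')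
--                 gene_name, tss, transcript_id = parts[2], parts[3], parts[4]
--                 key = (gene_name, tss, transcript_id)
--                 matching_elements = group2_dict.get(key, None)
--                 if matching_elements:
--                     sublist_result.append(f"{ele1}:{':'.join(matching_elements)}")
--                 else:
--                     sublist_result.append(f"{ele1}:None")
--             group_result.append(sublist_result)
--         mappings.append(group_result)
--     return mappings
-- ===== SOURCE B (Python) =====
-- def return_tss_mappings(comp1, comp2):
--     # Index-free re-implementation: no group2 dictionary; for each element of
--     # group1 we rescan the flattened group2 and collect the elements whose
--     # (parts[2], parts[3], parts[4]) key matches.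
--     def key(e):
--         p = e.split('_')
--         return (p[2], p[3], p[4])
--     result = []
--     for group1, group2 in zip(comp1, comp2):
--         flat2 = [e for sub in group2 for e in sub]
--         result.append([
--             [(lambda ms, e1: e1 + ":" + (":".join(ms) if ms else "None"))(
--                  [e2 for e2 in flat2 if key(e2) == key(e1)], e1)
--              for e1 in sub1]
--             for sub1 in group1])
--     return result
-- ===== Notes on version B (the rewrite author's own statement) =====
-- stated objective: alternative
-- what changed: B drops A's per-group defaultdict index entirely: for each group1 element it rescans the flattened group2 with a key-equality filter, building the nested result with comprehensions instead of accumulator loops.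
import Mathlib
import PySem

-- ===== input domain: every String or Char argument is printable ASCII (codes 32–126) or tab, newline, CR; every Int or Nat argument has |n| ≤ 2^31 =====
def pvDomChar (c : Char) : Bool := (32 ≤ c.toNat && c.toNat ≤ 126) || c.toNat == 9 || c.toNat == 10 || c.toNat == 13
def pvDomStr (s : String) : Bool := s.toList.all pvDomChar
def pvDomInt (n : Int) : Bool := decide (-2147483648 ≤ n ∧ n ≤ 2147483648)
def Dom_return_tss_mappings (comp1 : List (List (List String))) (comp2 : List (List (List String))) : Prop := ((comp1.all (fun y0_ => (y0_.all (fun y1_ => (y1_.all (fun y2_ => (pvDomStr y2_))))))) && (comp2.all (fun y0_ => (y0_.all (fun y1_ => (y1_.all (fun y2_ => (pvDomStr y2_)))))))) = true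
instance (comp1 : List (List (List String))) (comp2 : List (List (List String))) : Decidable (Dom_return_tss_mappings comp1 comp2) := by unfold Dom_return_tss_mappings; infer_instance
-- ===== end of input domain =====

-- B drops A's group2 dictionary: for each element of group1 it rescans the flattened group2,
-- filtering on equal (parts[2],parts[3],parts[4]) keys (objective: alternative decomposition).


-- ===== PORT A =====
-- key = (parts[2], parts[3], parts[4]); plain nonnegative indexing, exact under Pre_ (≥ 5 parts)
def pvKey (e : String) : String × String × String :=
  let parts := ((PySem.Str.split? e "_").getD [])  -- sep "_" ≠ "": split? is always some
  (parts.getD 2 "", parts.getD 3 "", parts.getD 4 "")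

def return_tss_mappings (comp1 : List (List (List String))) (comp2 : List (List (List String))) : List (List (List String)) :=
  (comp1.zip comp2).foldl (fun mappings gp =>
    let group1 := gp.1
    let group2 := gp.2
    -- defaultdict(list): group2_dict[key].append(ele2)
    let group2Dict : PySem.Dict (String × String × String) (List String) :=
      group2.foldl (fun d sublist2 =>
        sublist2.foldl (fun d ele2 => d.modify (pvKey ele2) [] (· ++ [ele2])) d) PySem.Dict.empty
    let groupResult := group1.foldl (fun groupResult sublist1 =>
      let sublistResult := sublist1.foldl (fun sublistResult ele1 =>
        -- .get(key, None) followed by truthiness: None and [] both take the ':None' branch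
        let matchingElements := group2Dict.getD (pvKey ele1) []
        sublistResult ++ [if matchingElements.isEmpty then ele1 ++ ":None"
                          else ele1 ++ ":" ++ PySem.Str.join ":" matchingElements]) []
      groupResult ++ [sublistResult]) []
    mappings ++ [groupResult]) []

-- ===== PORT B =====
def return_tss_mappings_alt (comp1 : List (List (List String))) (comp2 : List (List (List String))) : List (List (List String)) :=
  (comp1.zip comp2).map (fun gp =>
    let flat2 := gp.2.flatMap id
    gp.1.map (fun sub1 => sub1.map (fun e1 =>
      let ms := flat2.filter (fun e2 => pvKey e2 == pvKey e1)
      e1 ++ ":" ++ (if ms.isEmpty then "None" else PySem.Str.join ":" ms))))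

-- ===== PRECONDITION & SPEC =====
-- Pre_ excludes exactly the inputs where Python A raises IndexError: some element of a zipped
-- group (on either side) splits on '_' into fewer than 5 parts.
def Pre_return_tss_mappings (comp1 : List (List (List String))) (comp2 : List (List (List String))) : Prop :=
  ∀ gp ∈ comp1.zip comp2,
    (∀ sub ∈ gp.1, ∀ e ∈ sub, 5 ≤ (((PySem.Str.split? e "_").getD [])).length) ∧
    (∀ sub ∈ gp.2, ∀ e ∈ sub, 5 ≤ (((PySem.Str.split? e "_").getD [])).length)
instance (comp1 : List (List (List String))) (comp2 : List (List (List String))) : Decidable (Pre_return_tss_mappings comp1 comp2) := by unfold Pre_return_tss_mappings; infer_instance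

def pvWitness_return_tss_mappings : List (List (List String)) × List (List (List String)) :=
  ([[["a_1_g1_t1_x", "a_1_g2_t2_y"]]], [[["b_2_g1_t1_x"], ["b_3_g1_t1_x"]]])

def Spec_return_tss_mappings (comp1 : List (List (List String))) (comp2 : List (List (List String))) (out : List (List (List String))) : Prop := out = return_tss_mappings_alt comp1 comp2
instance (comp1 : List (List (List String))) (comp2 : List (List (List String))) (out : List (List (List String))) : Decidable (Spec_return_tss_mappings comp1 comp2 out) := by unfold Spec_return_tss_mappings; infer_instance

-- ===== CLAIM (what is proved, stated in full; the proofs are below) =====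
def Claim_equal_return_tss_mappings : Prop := ∀ (comp1 : List (List (List String))) (comp2 : List (List (List String))), Dom_return_tss_mappings comp1 comp2 → Pre_return_tss_mappings comp1 comp2 → Spec_return_tss_mappings comp1 comp2 (return_tss_mappings comp1 comp2)

-- ===== LEMMAS AND PROOFS =====

-- the nested group2 fold is the fold over the flattened group2
theorem pvFoldlFlat {α β : Type} (f : β → α → β) :
    ∀ (gs : List (List α)) (d : β),
      gs.foldl (fun d sub => sub.foldl f d) d = (gs.flatMap id).foldl f d := by
  intro gs
  induction gs with
  | nil => intro d; simp
  | cons g gs ih => intro d; simp [List.foldl_append, ih]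

-- A's dictionary lookup is B's filter over the flattened group2
theorem pvDictChar (elems : List String) (k : String × String × String) :
    (elems.foldl (fun d e => d.modify (pvKey e) [] (· ++ [e])) PySem.Dict.empty).getD k []
      = elems.filter (fun e => pvKey e == k) := by
  have h := PySem.Dict.getD_foldl_modify_append
    (l := elems.map (fun e => (pvKey e, e))) (d := PySem.Dict.empty) (c := k)
  rw [List.foldl_map] at h
  rw [h]
  simp [List.filter_map, Function.comp_def]

theorem pvEq (comp1 comp2 : List (List (List String))) :
    return_tss_mappings comp1 comp2 = return_tss_mappings_alt comp1 comp2 := by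
  unfold return_tss_mappings return_tss_mappings_alt
  rw [PySem.List.foldl_append_singleton_eq_map]
  refine List.map_congr_left ?_
  intro gp _
  rw [PySem.List.foldl_append_singleton_eq_map]
  refine List.map_congr_left ?_
  intro sub1 _
  rw [PySem.List.foldl_append_singleton_eq_map]
  refine List.map_congr_left ?_
  intro e1 _
  rw [pvFoldlFlat, pvDictChar]
  show (if (List.filter (fun e2 => pvKey e2 == pvKey e1) (List.flatMap id gp.2)).isEmpty then
          e1 ++ ":None"
        else e1 ++ ":" ++ PySem.Str.join ":" (List.filter (fun e2 => pvKey e2 == pvKey e1) (List.flatMap id gp.2)))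
      = e1 ++ ":" ++ (if (List.filter (fun e2 => pvKey e2 == pvKey e1) (List.flatMap id gp.2)).isEmpty then
          "None"
        else PySem.Str.join ":" (List.filter (fun e2 => pvKey e2 == pvKey e1) (List.flatMap id gp.2)))
  cases hm : (List.filter (fun e2 => pvKey e2 == pvKey e1) (List.flatMap id gp.2)).isEmpty
  · rfl
  · rw [if_pos rfl, if_pos rfl, String.append_assoc]
    rfl

-- ===== VERDICT (by name: the statement is the Claim_ definition above) =====
theorem return_tss_mappings_spec : Claim_equal_return_tss_mappings := by
  intro comp1 comp2 _ _
  exact pvEq comp1 comp2
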